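-- pv_equiv track=rewrite | github.com/sergmain/java-version-migration | python/angular_authentication_migration.py | _split_parameters
-- ===== SOURCE A (Python) =====
-- def _split_parameters(params_text: str) -> list:
--     """
--     Split parameter list by commas, handling nested generics.
--
--     Args:
--         params_text: The text between constructor parentheses
--
--     Returns:
--         List of parameter strings
--     """
--     params = []
--     current_param = ''
--     angle_bracket_depth = 0
--     paren_depth = 0
--
--     for char in params_text:
--         if char == '<':
--             angle_bracket_depth += 1
--             current_param += char
--         elif char == '>':
--             angle_bracket_depth -= 1
--             current_param += char
--         elif char == '(':
--             paren_depth += 1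
--             current_param += char
--         elif char == ')':
--             paren_depth -= 1
--             current_param += char
--         elif char == ',' and angle_bracket_depth == 0 and paren_depth == 0:
--             params.append(current_param.strip())
--             current_param = ''
--         else:
--             current_param += char
--
--     if current_param.strip():
--         params.append(current_param.strip())
--
--     return params
-- ===== SOURCE B (Python) =====
-- def _split_parameters(params_text: str) -> list:
--     """Split parameter list by top-level commas: repeatedly find the next
--     top-level comma and cut the string there, instead of accumulating a
--     current-parameter buffer in a single state machine."""
--
--     def _top_level_comma(s):
--         angle = 0
--         paren = 0
--         for i, ch in enumerate(s):
--             if ch == '<':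
--                 angle += 1
--             elif ch == '>':
--                 angle -= 1
--             elif ch == '(':
--                 paren += 1
--             elif ch == ')':
--                 paren -= 1
--             elif ch == ',' and angle == 0 and paren == 0:
--                 return i
--         return None
--
--     params = []
--     rest = params_text
--     while True:
--         i = _top_level_comma(rest)
--         if i is None:
--             break
--         params.append(rest[:i].strip())
--         rest = rest[i + 1:]
--     tail = rest.strip()
--     if tail:
--         params.append(tail)
--     return params
-- ===== Notes on version B (the rewrite author's own statement) =====
-- stated objective: alternative
-- what changed: Replaces A's single state machine that accumulates a current-parameter buffer character by character with repeated find-next-top-level-comma scans that slice the string at each cut (depth counters restart at zero after every cut, which is sound because cuts happen only at depth zero).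
import Mathlib
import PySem

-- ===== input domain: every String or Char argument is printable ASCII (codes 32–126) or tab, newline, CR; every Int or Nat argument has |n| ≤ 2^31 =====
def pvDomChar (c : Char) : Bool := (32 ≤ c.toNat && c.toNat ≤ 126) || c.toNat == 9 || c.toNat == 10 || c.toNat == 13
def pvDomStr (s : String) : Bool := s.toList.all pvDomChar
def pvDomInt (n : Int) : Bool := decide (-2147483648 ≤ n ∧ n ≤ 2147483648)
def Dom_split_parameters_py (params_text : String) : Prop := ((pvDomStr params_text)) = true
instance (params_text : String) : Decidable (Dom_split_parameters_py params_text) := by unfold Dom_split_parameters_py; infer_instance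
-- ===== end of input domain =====

-- B changes the decomposition: repeated find-next-top-level-comma scans with slicing, instead of A's single buffer-accumulating state machine; same cost (objective: alternative).

-- ===== PORT A =====
-- one step of A's for-loop over the characters; state = (params, current_param, angle_bracket_depth, paren_depth)
def stepA (st : List (List Char) × List Char × Int × Int) (c : Char) :
    List (List Char) × List Char × Int × Int :=
  match st with
  | (params, cur, a, p) =>
    if c = '<' then (params, cur ++ [c], a + 1, p)
    else if c = '>' then (params, cur ++ [c], a - 1, p)
    else if c = '(' then (params, cur ++ [c], a, p + 1)
    else if c = ')' then (params, cur ++ [c], a, p - 1)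
    else if c = ',' ∧ a = 0 ∧ p = 0 then (params ++ [PySem.Chars.strip cur], [], a, p)
    else (params, cur ++ [c], a, p)

def split_parameters_py (params_text : String) : List String :=
  let st := params_text.toList.foldl stepA ([], [], 0, 0)
  let params :=
    if PySem.Chars.strip st.2.1 ≠ [] then st.1 ++ [PySem.Chars.strip st.2.1] else st.1
  params.map String.mk

-- ===== PORT B =====
-- B's helper _top_level_comma: index of the first top-level comma, or none
def cutB (angle paren : Int) : List Char → Option Nat
  | [] => none
  | c :: s =>
    if c = '<' then (cutB (angle + 1) paren s).map (· + 1)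
    else if c = '>' then (cutB (angle - 1) paren s).map (· + 1)
    else if c = '(' then (cutB angle (paren + 1) s).map (· + 1)
    else if c = ')' then (cutB angle (paren - 1) s).map (· + 1)
    else if c = ',' ∧ angle = 0 ∧ paren = 0 then some 0
    else (cutB angle paren s).map (· + 1)

-- termination helper for loopB: a found comma index is inside the string
theorem cutB_some_lt {a p : Int} {s : List Char} {i : Nat} (h : cutB a p s = some i) :
    i < s.length := by
  induction s generalizing a p i with
  | nil => simp [cutB] at h
  | cons c s ih =>
    simp only [cutB] at h
    split_ifs at h <;>
      first
        | (simp only [Option.map_eq_some_iff] at h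
           obtain ⟨j, hj, rfl⟩ := h
           simpa using Nat.succ_lt_succ (ih hj))
        | (cases h; simp)

-- B's while-loop
def loopB (params : List (List Char)) (rest : List Char) : List (List Char) :=
  match h : cutB 0 0 rest with
  | none =>
    let tail := PySem.Chars.strip rest
    if tail ≠ [] then params ++ [tail] else params
  | some i => loopB (params ++ [PySem.Chars.strip (rest.take i)]) (rest.drop (i + 1))
termination_by rest.length
decreasing_by
  have := cutB_some_lt h
  simp only [List.length_drop]; omega

def split_parameters_py_alt (params_text : String) : List String :=
  (loopB [] params_text.toList).map String.mk

-- ===== PRECONDITION & SPEC =====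
def Spec_split_parameters_py (params_text : String) (out : List String) : Prop := out = split_parameters_py_alt params_text
instance (params_text : String) (out : List String) : Decidable (Spec_split_parameters_py params_text out) := by unfold Spec_split_parameters_py; infer_instance

-- ===== CLAIM (what is proved, stated in full; the proofs are below) =====
def Claim_equal_split_parameters_py : Prop := ∀ (params_text : String), Dom_split_parameters_py params_text → Spec_split_parameters_py params_text (split_parameters_py params_text)

-- ===== LEMMAS AND PROOFS =====

-- unfolding equations for the two ports' branch structures
theorem stepA_lt (ps : List (List Char)) (cur : List Char) (a p : Int) :
    stepA (ps, cur, a, p) '<' = (ps, cur ++ ['<'], a + 1, p) := rfl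
theorem stepA_gt (ps : List (List Char)) (cur : List Char) (a p : Int) :
    stepA (ps, cur, a, p) '>' = (ps, cur ++ ['>'], a - 1, p) := rfl
theorem stepA_lp (ps : List (List Char)) (cur : List Char) (a p : Int) :
    stepA (ps, cur, a, p) '(' = (ps, cur ++ ['('], a, p + 1) := rfl
theorem stepA_rp (ps : List (List Char)) (cur : List Char) (a p : Int) :
    stepA (ps, cur, a, p) ')' = (ps, cur ++ [')'], a, p - 1) := rfl
theorem stepA_comma (ps : List (List Char)) (cur : List Char) :
    stepA (ps, cur, 0, 0) ',' = (ps ++ [PySem.Chars.strip cur], [], 0, 0) := rfl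
theorem stepA_other (ps : List (List Char)) (cur : List Char) (a p : Int) (c : Char)
    (h1 : ¬ c = '<') (h2 : ¬ c = '>') (h3 : ¬ c = '(') (h4 : ¬ c = ')')
    (h5 : ¬ (c = ',' ∧ a = 0 ∧ p = 0)) :
    stepA (ps, cur, a, p) c = (ps, cur ++ [c], a, p) := by
  simp [stepA, h1, h2, h3, h4, h5]

theorem cutB_lt (a p : Int) (s : List Char) :
    cutB a p ('<' :: s) = (cutB (a + 1) p s).map (· + 1) := rfl
theorem cutB_gt (a p : Int) (s : List Char) :
    cutB a p ('>' :: s) = (cutB (a - 1) p s).map (· + 1) := rfl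
theorem cutB_lp (a p : Int) (s : List Char) :
    cutB a p ('(' :: s) = (cutB a (p + 1) s).map (· + 1) := rfl
theorem cutB_rp (a p : Int) (s : List Char) :
    cutB a p (')' :: s) = (cutB a (p - 1) s).map (· + 1) := rfl
theorem cutB_comma (s : List Char) : cutB 0 0 (',' :: s) = some 0 := rfl
theorem cutB_other (a p : Int) (s : List Char) (c : Char)
    (h1 : ¬ c = '<') (h2 : ¬ c = '>') (h3 : ¬ c = '(') (h4 : ¬ c = ')')
    (h5 : ¬ (c = ',' ∧ a = 0 ∧ p = 0)) :
    cutB a p (c :: s) = (cutB a p s).map (· + 1) := by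
  simp [cutB, h1, h2, h3, h4, h5]

-- unfolding equations for B's while-loop
theorem loopB_none {ps : List (List Char)} {rest : List Char} (h : cutB 0 0 rest = none) :
    loopB ps rest =
      if PySem.Chars.strip rest ≠ [] then ps ++ [PySem.Chars.strip rest] else ps := by
  rw [loopB.eq_def]
  split <;> simp_all

theorem loopB_some {ps : List (List Char)} {rest : List Char} {i : Nat}
    (h : cutB 0 0 rest = some i) :
    loopB ps rest = loopB (ps ++ [PySem.Chars.strip (rest.take i)]) (rest.drop (i + 1)) := by
  rw [loopB.eq_def]
  split <;> simp_all

-- Core invariant: running A's fold over s from state (ps, cur, a, p) either reaches the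
-- first top-level comma (as found by B's cutB from the same depths) — the accumulated
-- parameter there is exactly cur ++ s.take i, after which the state resets — or, if there
-- is no such comma, just appends all of s to cur.
theorem coreA (s : List Char) (ps : List (List Char)) (cur : List Char) (a p : Int) :
    (∀ i, cutB a p s = some i →
      s.foldl stepA (ps, cur, a, p) =
        (s.drop (i + 1)).foldl stepA (ps ++ [PySem.Chars.strip (cur ++ s.take i)], [], 0, 0)) ∧
    (cutB a p s = none →
      ∃ a' p', s.foldl stepA (ps, cur, a, p) = (ps, cur ++ s, a', p')) := by
  induction s generalizing ps cur a p with
  | nil =>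
    exact ⟨fun i hi => by simp [cutB] at hi, fun _ => ⟨a, p, by simp⟩⟩
  | cons c s ih =>
    by_cases h1 : c = '<'
    · subst h1
      refine ⟨fun i hi => ?_, fun hn => ?_⟩
      · rw [cutB_lt] at hi
        cases hj : cutB (a + 1) p s with
        | none => rw [hj] at hi; simp at hi
        | some j =>
          rw [hj] at hi
          simp only [Option.map_some, Option.some.injEq] at hi
          subst hi
          have := (ih ps (cur ++ ['<']) (a + 1) p).1 j hj
          simpa [stepA_lt, List.append_assoc] using this
      · rw [cutB_lt, Option.map_eq_none_iff] at hn
        obtain ⟨a', p', h⟩ := (ih ps (cur ++ ['<']) (a + 1) p).2 hn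
        exact ⟨a', p', by simpa [stepA_lt, List.append_assoc] using h⟩
    · by_cases h2 : c = '>'
      · subst h2
        refine ⟨fun i hi => ?_, fun hn => ?_⟩
        · rw [cutB_gt] at hi
          cases hj : cutB (a - 1) p s with
          | none => rw [hj] at hi; simp at hi
          | some j =>
            rw [hj] at hi
            simp only [Option.map_some, Option.some.injEq] at hi
            subst hi
            have := (ih ps (cur ++ ['>']) (a - 1) p).1 j hj
            simpa [stepA_gt, List.append_assoc] using this
        · rw [cutB_gt, Option.map_eq_none_iff] at hn
          obtain ⟨a', p', h⟩ := (ih ps (cur ++ ['>']) (a - 1) p).2 hn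
          exact ⟨a', p', by simpa [stepA_gt, List.append_assoc] using h⟩
      · by_cases h3 : c = '('
        · subst h3
          refine ⟨fun i hi => ?_, fun hn => ?_⟩
          · rw [cutB_lp] at hi
            cases hj : cutB a (p + 1) s with
            | none => rw [hj] at hi; simp at hi
            | some j =>
              rw [hj] at hi
              simp only [Option.map_some, Option.some.injEq] at hi
              subst hi
              have := (ih ps (cur ++ ['(']) a (p + 1)).1 j hj
              simpa [stepA_lp, List.append_assoc] using this
          · rw [cutB_lp, Option.map_eq_none_iff] at hn
            obtain ⟨a', p', h⟩ := (ih ps (cur ++ ['(']) a (p + 1)).2 hn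
            exact ⟨a', p', by simpa [stepA_lp, List.append_assoc] using h⟩
        · by_cases h4 : c = ')'
          · subst h4
            refine ⟨fun i hi => ?_, fun hn => ?_⟩
            · rw [cutB_rp] at hi
              cases hj : cutB a (p - 1) s with
              | none => rw [hj] at hi; simp at hi
              | some j =>
                rw [hj] at hi
                simp only [Option.map_some, Option.some.injEq] at hi
                subst hi
                have := (ih ps (cur ++ [')']) a (p - 1)).1 j hj
                simpa [stepA_rp, List.append_assoc] using this
            · rw [cutB_rp, Option.map_eq_none_iff] at hn
              obtain ⟨a', p', h⟩ := (ih ps (cur ++ [')']) a (p - 1)).2 hn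
              exact ⟨a', p', by simpa [stepA_rp, List.append_assoc] using h⟩
          · by_cases h5 : c = ',' ∧ a = 0 ∧ p = 0
            · obtain ⟨rfl, rfl, rfl⟩ := h5
              refine ⟨fun i hi => ?_, fun hn => ?_⟩
              · rw [cutB_comma] at hi
                injection hi with hi
                subst hi
                simp [stepA_comma]
              · rw [cutB_comma] at hn
                simp at hn
            · refine ⟨fun i hi => ?_, fun hn => ?_⟩
              · rw [cutB_other a p s c h1 h2 h3 h4 h5] at hi
                cases hj : cutB a p s with
                | none => rw [hj] at hi; simp at hi
                | some j =>
                  rw [hj] at hi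
                  simp only [Option.map_some, Option.some.injEq] at hi
                  subst hi
                  have := (ih ps (cur ++ [c]) a p).1 j hj
                  simpa [stepA_other ps cur a p c h1 h2 h3 h4 h5, List.append_assoc] using this
              · rw [cutB_other a p s c h1 h2 h3 h4 h5, Option.map_eq_none_iff] at hn
                obtain ⟨a', p', h⟩ := (ih ps (cur ++ [c]) a p).2 hn
                exact ⟨a', p',
                  by simpa [stepA_other ps cur a p c h1 h2 h3 h4 h5, List.append_assoc] using h⟩

-- A's fold from a fresh segment start, finalized, equals B's loop.
theorem mainEq (n : Nat) :
    ∀ (s : List Char), s.length ≤ n → ∀ (ps : List (List Char)),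
      (if PySem.Chars.strip (s.foldl stepA (ps, [], 0, 0)).2.1 ≠ [] then
        (s.foldl stepA (ps, [], 0, 0)).1 ++ [PySem.Chars.strip (s.foldl stepA (ps, [], 0, 0)).2.1]
       else (s.foldl stepA (ps, [], 0, 0)).1) = loopB ps s := by
  induction n with
  | zero =>
    intro s hs ps
    cases s with
    | nil => rw [loopB_none rfl]; rfl
    | cons c s => simp at hs
  | succ n ih =>
    intro s hs ps
    cases hcut : cutB 0 0 s with
    | none =>
      obtain ⟨a', p', h⟩ := (coreA s ps [] 0 0).2 hcut
      rw [loopB_none hcut, h]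
      simp
    | some i =>
      have hstep := (coreA s ps [] 0 0).1 i hcut
      have hlen : (s.drop (i + 1)).length ≤ n := by
        have := cutB_some_lt hcut
        simp only [List.length_drop]; omega
      rw [loopB_some hcut, hstep]
      simpa using ih (s.drop (i + 1)) hlen (ps ++ [PySem.Chars.strip (List.take i s)])

-- ===== VERDICT (by name: the statement is the Claim_ definition above) =====
theorem split_parameters_py_spec : Claim_equal_split_parameters_py := by
  intro s _
  unfold Spec_split_parameters_py split_parameters_py split_parameters_py_alt
  exact congrArg (List.map String.mk) (mainEq s.toList.length s.toList le_rfl [])
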